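-- pv_equiv track=rewrite | github.com/MyLinhRP/greedy_choice | different_summands.py | find_distinct_summands
-- ===== SOURCE A (Python) =====
-- def find_distinct_summands(n: int):
--     ans = []
--     i = 1
--     while i + 1 <= n - i:
--         ans.append(i)
--         n -= i
--         i += 1
--     if 0 < n:
--         ans.append(n)
--     return ans
-- ===== SOURCE B (Python) =====
-- def find_distinct_summands(n: int):
--     # Binary search for the largest k with k*(k+1)/2 <= n, then emit 1..k-1 and the leftover.
--     if n < 1:
--         return []
--     lo, hi = 1, n
--     while lo < hi:
--         mid = (lo + hi + 1) // 2
--         if mid * (mid + 1) <= 2 * n: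
--             lo = mid
--         else:
--             hi = mid - 1
--     k = lo
--     return list(range(1, k)) + [n - k * (k - 1) // 2]
-- ===== Notes on version B (the rewrite author's own statement) =====
-- stated objective: alternative
-- what changed: B finds the number of summands by binary search on the triangular-number bound and emits the initial run of consecutive integers plus a closed-form leftover, instead of A's loop that subtracts each summand from n in turn.
import Mathlib
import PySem

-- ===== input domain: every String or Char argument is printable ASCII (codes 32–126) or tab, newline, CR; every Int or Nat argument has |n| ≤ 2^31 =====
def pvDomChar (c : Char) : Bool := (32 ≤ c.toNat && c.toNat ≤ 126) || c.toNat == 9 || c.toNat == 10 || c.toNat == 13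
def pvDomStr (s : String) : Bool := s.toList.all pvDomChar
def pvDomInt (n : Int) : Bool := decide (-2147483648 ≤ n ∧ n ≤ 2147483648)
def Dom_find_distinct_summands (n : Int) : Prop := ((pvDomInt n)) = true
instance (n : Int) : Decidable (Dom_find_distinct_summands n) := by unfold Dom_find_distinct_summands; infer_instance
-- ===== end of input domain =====

-- B: finds the summand count k by binary search on k(k+1)/2 <= n and emits range(1,k) plus the
-- leftover, instead of A's loop that subtracts each summand from n one by one; same return value.
-- (Both loop ports carry a Nat fuel solely as a totality guard; the fuel is proved sufficient.)

-- ===== PORT A =====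
-- A's while loop, state (ans, n, i); fuel only makes the recursion structural.
def pvLoopA : Nat → List Int → Int → Int → List Int
  | 0, ans, _, _ => ans
  | fuel + 1, ans, n, i =>
    if i + 1 ≤ n - i then pvLoopA fuel (ans ++ [i]) (n - i) (i + 1)
    else if 0 < n then ans ++ [n] else ans

def find_distinct_summands (n : Int) : List Int := pvLoopA (n.toNat + 1) [] n 1

-- ===== PORT B =====
-- B's binary-search loop over (lo, hi); fuel only makes the recursion structural.
def pvSearchB : Nat → Int → Int → Int → Int
  | 0, _, lo, _ => lo
  | fuel + 1, n, lo, hi =>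
    if lo < hi then
      let mid := PySem.Int.floordiv (lo + hi + 1) 2
      if mid * (mid + 1) ≤ 2 * n then pvSearchB fuel n mid hi else pvSearchB fuel n lo (mid - 1)
    else lo

def find_distinct_summands_alt (n : Int) : List Int :=
  if n < 1 then []
  else
    let k := pvSearchB n.toNat n 1 n
    PySem.List.pyRange 1 k 1 ++ [n - PySem.Int.floordiv (k * (k - 1)) 2]

-- ===== PRECONDITION & SPEC =====
def Spec_find_distinct_summands (n : Int) (out : List Int) : Prop := out = find_distinct_summands_alt n
instance (n : Int) (out : List Int) : Decidable (Spec_find_distinct_summands n out) := by unfold Spec_find_distinct_summands; infer_instance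

-- ===== CLAIM (what is proved, stated in full; the proofs are below) =====
def Claim_equal_find_distinct_summands : Prop := ∀ (n : Int), Dom_find_distinct_summands n → Spec_find_distinct_summands n (find_distinct_summands n)

-- ===== LEMMAS AND PROOFS =====

-- the python midpoint (lo+hi+1)//2 lies strictly above lo and at most hi
theorem pvMid_bounds (lo hi : Int) (h : lo < hi) :
    lo < PySem.Int.floordiv (lo + hi + 1) 2 ∧ PySem.Int.floordiv (lo + hi + 1) 2 ≤ hi := by
  rw [PySem.Int.floordiv_eq_ediv_of_pos (by norm_num)]
  omega

-- with enough fuel, the binary search returns the largest k with k(k+1) ≤ 2n, given a bracket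
theorem pvSearchB_correct (n : Int) : ∀ fuel : Nat, ∀ lo hi : Int, (hi - lo).toNat ≤ fuel → 1 ≤ lo → lo ≤ hi →
    lo * (lo + 1) ≤ 2 * n → 2 * n < (hi + 1) * (hi + 2) →
    1 ≤ pvSearchB fuel n lo hi ∧ pvSearchB fuel n lo hi * (pvSearchB fuel n lo hi + 1) ≤ 2 * n ∧
      2 * n < (pvSearchB fuel n lo hi + 1) * (pvSearchB fuel n lo hi + 2) := by
  intro fuel
  induction fuel with
  | zero =>
    intro lo hi hd h1 h2 h3 h4
    have he : lo = hi := by omega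
    subst he
    exact ⟨h1, h3, h4⟩
  | succ f ih =>
    intro lo hi hd h1 h2 h3 h4
    rw [pvSearchB]
    by_cases h : lo < hi
    · rw [if_pos h]
      have hm := pvMid_bounds lo hi h
      set mid := PySem.Int.floordiv (lo + hi + 1) 2 with hmid
      by_cases hc : mid * (mid + 1) ≤ 2 * n
      · simp only [if_pos hc]
        exact ih mid hi (by omega) (by omega) (by omega) hc h4
      · simp only [if_neg hc]
        have hub : 2 * n < ((mid - 1) + 1) * ((mid - 1) + 2) := by
          have he : ((mid - 1) + 1) * ((mid - 1) + 2) = mid * (mid + 1) := by ring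
          rw [he]; exact lt_of_not_ge hc
        exact ih lo (mid - 1) (by omega) h1 (by omega) h3 hub
    · rw [if_neg h]
      have he : lo = hi := by omega
      subst he
      exact ⟨h1, h3, h4⟩

-- A's loop, run from state (m, i) with 2m = 2n - (i-1)i and i ≤ k, yields i..k-1 then the leftover
theorem pvLoopA_run (n k : Int) (hk1 : 1 ≤ k) (hk2 : k * (k + 1) ≤ 2 * n)
    (hk3 : 2 * n < (k + 1) * (k + 2)) :
    ∀ d fuel : Nat, ∀ i m : Int, ∀ ans : List Int, (k - i).toNat = d → d < fuel → 1 ≤ i → i ≤ k →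
      2 * m = 2 * n - (i - 1) * i →
      pvLoopA fuel ans m i = ans ++ PySem.List.pyRange i k 1 ++ [n - PySem.Int.floordiv (k * (k - 1)) 2] := by
  have hfd : 2 * PySem.Int.floordiv (k * (k - 1)) 2 = k * (k - 1) := by
    rw [PySem.Int.floordiv_eq_ediv_of_pos (by norm_num)]
    have hev : (2 : Int) ∣ k * (k - 1) := by
      have h1 : Even ((k - 1) * ((k - 1) + 1)) := Int.even_mul_succ_self (k - 1)
      have h2 : Even (k * (k - 1)) := by rw [show k * (k - 1) = (k - 1) * ((k - 1) + 1) by ring]; exact h1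
      exact h2.two_dvd
    rw [mul_comm]
    exact Int.ediv_mul_cancel hev
  intro d
  induction d with
  | zero =>
    intro fuel i m ans hd hfuel hi hik hm
    obtain ⟨f, rfl⟩ : ∃ f, fuel = f + 1 := ⟨fuel - 1, by omega⟩
    have hik' : i = k := by omega
    subst hik'
    rw [pvLoopA]
    have hcond : ¬ (i + 1 ≤ m - i) := by nlinarith
    rw [if_neg hcond, if_pos (by nlinarith)]
    have hmr : m = n - PySem.Int.floordiv (i * (i - 1)) 2 := by
      have h' : (i - 1) * i = i * (i - 1) := by ring
      omega
    have hrng : PySem.List.pyRange i i 1 = [] := by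
      rw [PySem.List.pyRange_one]
      simp
    rw [hmr, hrng]
    simp
  | succ d ihd =>
    intro fuel i m ans hd hfuel hi hik hm
    obtain ⟨f, rfl⟩ : ∃ f, fuel = f + 1 := ⟨fuel - 1, by omega⟩
    have hlt : i < k := by omega
    have hcond : i + 1 ≤ m - i := by
      nlinarith [hk2, hm, mul_le_mul (by omega : i + 1 ≤ k) (by omega : i + 2 ≤ k + 1)
        (by omega : (0:Int) ≤ i + 2) (by omega : (0:Int) ≤ k)]
    rw [pvLoopA, if_pos hcond]
    have hm' : 2 * (m - i) = 2 * n - ((i + 1) - 1) * (i + 1) := by nlinarith [hm]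
    rw [ihd f (i + 1) (m - i) (ans ++ [i]) (by omega) (by omega) (by omega) (by omega) hm']
    rw [PySem.List.pyRange_one_cons hlt]
    simp

theorem find_distinct_summands_eq (n : Int) : find_distinct_summands n = find_distinct_summands_alt n := by
  by_cases hn : n < 1
  · have hA : find_distinct_summands n = [] := by
      have ht : n.toNat = 0 := by omega
      unfold find_distinct_summands
      rw [ht, pvLoopA, if_neg (by omega), if_neg (by omega)]
    rw [hA, find_distinct_summands_alt, if_pos hn]
  · push Not at hn
    have hbr : 2 * n < (n + 1) * (n + 2) := by nlinarith
    obtain ⟨h1, h2, h3⟩ := pvSearchB_correct n n.toNat 1 n (by omega) (le_refl 1) hn (by nlinarith) hbr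
    have hkn : pvSearchB n.toNat n 1 n ≤ n := by nlinarith
    rw [find_distinct_summands_alt, if_neg (by omega)]
    exact pvLoopA_run n (pvSearchB n.toNat n 1 n) h1 h2 h3
      (pvSearchB n.toNat n 1 n - 1).toNat (n.toNat + 1) 1 n [] rfl (by omega) (le_refl 1) h1 (by ring)

-- ===== VERDICT (by name: the statement is the Claim_ definition above) =====
theorem find_distinct_summands_spec : Claim_equal_find_distinct_summands := by
  intro n _
  exact find_distinct_summands_eq n
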